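-- pv_equiv track=rewrite | github.com/xhdixhfl/co_test | 프로그래머스/unrated/181926. 수 조작하기 1/수 조작하기 1.py | solution
-- ===== SOURCE A (Python) =====
-- def solution(n, control):
--
--     for s in control:
--         if s =='w':
--             n += 1
--         elif s =='s':
--             n -= 1
--         elif s =='d':
--             n += 10
--         elif s =='a':
--             n -= 10
--     return n
-- ===== SOURCE B (Python) =====
-- def solution(n, control):
--     return (n + control.count('w') - control.count('s')
--               + 10 * control.count('d') - 10 * control.count('a'))
-- ===== Notes on version B (the rewrite author's own statement) =====
-- stated objective: faster
-- what changed: Replaces the interpreted accumulator loop with an if/elif chain by a closed-form arithmetic combination of four str.count scans (C-level counting, no per-character Python bytecode).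
import Mathlib
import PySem

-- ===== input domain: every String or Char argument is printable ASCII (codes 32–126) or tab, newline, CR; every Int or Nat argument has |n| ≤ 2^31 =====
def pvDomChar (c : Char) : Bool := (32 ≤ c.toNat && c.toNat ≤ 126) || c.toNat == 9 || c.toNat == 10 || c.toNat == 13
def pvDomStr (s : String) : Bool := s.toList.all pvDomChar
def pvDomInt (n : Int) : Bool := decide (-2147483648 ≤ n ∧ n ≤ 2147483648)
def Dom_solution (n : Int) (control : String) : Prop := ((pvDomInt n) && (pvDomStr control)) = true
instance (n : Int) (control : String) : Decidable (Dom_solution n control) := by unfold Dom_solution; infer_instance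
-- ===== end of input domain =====

-- B replaces A's branching accumulator loop by a closed-form combination of four str.count scans (objective: faster; measured).

-- ===== PORT A =====
def solution (n : Int) (control : String) : Int :=
  control.toList.foldl
    (fun n s =>
      if s = 'w' then n + 1
      else if s = 's' then n - 1
      else if s = 'd' then n + 10
      else if s = 'a' then n - 10
      else n) n

-- ===== PORT B =====
def solution_alt (n : Int) (control : String) : Int :=
  n + (PySem.Str.count control "w" : Int) - (PySem.Str.count control "s" : Int)
    + 10 * (PySem.Str.count control "d" : Int) - 10 * (PySem.Str.count control "a" : Int)

-- ===== PRECONDITION & SPEC =====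
def Spec_solution (n : Int) (control : String) (out : Int) : Prop := out = solution_alt n control
instance (n : Int) (control : String) (out : Int) : Decidable (Spec_solution n control out) := by unfold Spec_solution; infer_instance

-- ===== CLAIM (what is proved, stated in full; the proofs are below) =====
def Claim_equal_solution : Prop := ∀ (n : Int) (control : String), Dom_solution n control → Spec_solution n control (solution n control)

-- ===== LEMMAS AND PROOFS =====

-- Python's s.count(c) with a single-character needle counts occurrences of that character.
theorem chars_count_go_singleton (c : Char) (fuel : Nat) (l : List Char) (acc : Nat)
    (h : l.length ≤ fuel) :
    PySem.Chars.count.go [c] fuel l acc = acc + l.count c := by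
  induction fuel generalizing l acc with
  | zero =>
    cases l with
    | nil => simp [PySem.Chars.count.go]
    | cons hd t => simp at h
  | succ fuel ih =>
    cases l with
    | nil => simp [PySem.Chars.count.go]
    | cons hd t =>
      simp only [List.length_cons, Nat.succ_le_succ_iff] at h
      by_cases hc : hd = c
      · subst hc
        have hp : List.isPrefixOf [hd] (hd :: t) = true := by
          simp [List.isPrefixOf]
        simp only [PySem.Chars.count.go, hp, if_pos, List.length_cons, List.length_nil,
          List.drop_succ_cons, List.drop_zero]
        rw [ih t (acc + 1) (by simpa using h)]
        simp
        omega
      · have hp : List.isPrefixOf [c] (hd :: t) = false := by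
          simp [List.isPrefixOf]
          intro hco
          exact absurd hco.symm hc
        simp only [PySem.Chars.count.go, hp]
        rw [ih t acc h]
        simp [hc]

theorem chars_count_singleton (c : Char) (l : List Char) :
    PySem.Chars.count l [c] = l.count c := by
  have : PySem.Chars.count l [c] = PySem.Chars.count.go [c] l.length l 0 := rfl
  rw [this]
  simpa using chars_count_go_singleton c l.length l 0 (le_refl _)

theorem str_count_singleton (c : Char) (s : String) :
    PySem.Str.count s (String.ofList [c]) = s.toList.count c := by
  rw [PySem.Str.count_eq]
  simpa using chars_count_singleton c s.toList

theorem foldl_move (l : List Char) (n : Int) :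
    l.foldl
      (fun n s =>
        if s = 'w' then n + 1
        else if s = 's' then n - 1
        else if s = 'd' then n + 10
        else if s = 'a' then n - 10
        else n) n
    = n + (l.count 'w' : Int) - (l.count 's' : Int)
        + 10 * (l.count 'd' : Int) - 10 * (l.count 'a' : Int) := by
  induction l generalizing n with
  | nil => simp
  | cons hd t ih =>
    simp only [List.foldl_cons, ih, List.count_cons]
    split_ifs with h1 h2 h3 h4 <;> subst_vars <;> simp_all <;> ring

-- ===== VERDICT (by name: the statement is the Claim_ definition above) =====
theorem solution_spec : Claim_equal_solution := by
  intro n control _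
  unfold Spec_solution solution solution_alt
  rw [foldl_move]
  have hw := str_count_singleton 'w' control
  have hs := str_count_singleton 's' control
  have hd := str_count_singleton 'd' control
  have ha := str_count_singleton 'a' control
  simp only [show ("w" : String) = String.ofList ['w'] from rfl,
    show ("s" : String) = String.ofList ['s'] from rfl,
    show ("d" : String) = String.ofList ['d'] from rfl,
    show ("a" : String) = String.ofList ['a'] from rfl, hw, hs, hd, ha]
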